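-- pv_equiv track=rewrite | github.com/fatehr15/SecBootCampCtf | crypto-challenges/White Bird Final Words/Encrypt.py | bird_encrypt
-- ===== SOURCE A (Python) =====
-- def bird_encrypt(text: str) -> str:
--     vowels = "aeiouAEIOU"
--     result = []
--     for ch in text:
--         if ch in vowels:
--             result.append(ch + '@' + ch)
--         else:
--             result.append(ch)
--     return ''.join(result)
-- ===== SOURCE B (Python) =====
-- def bird_encrypt(text: str) -> str:
--     for v in "aeiouAEIOU":
--         text = text.replace(v, v + '@' + v)
--     return text
-- ===== Notes on version B (the rewrite author's own statement) =====
-- stated objective: faster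
-- what changed: Replaces A's single per-character scan (membership branch plus list-append) by ten staged whole-string str.replace passes, one per vowel; correct because each pass inserts only separator and copies of its own vowel, which no later pass matches.
import Mathlib
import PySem

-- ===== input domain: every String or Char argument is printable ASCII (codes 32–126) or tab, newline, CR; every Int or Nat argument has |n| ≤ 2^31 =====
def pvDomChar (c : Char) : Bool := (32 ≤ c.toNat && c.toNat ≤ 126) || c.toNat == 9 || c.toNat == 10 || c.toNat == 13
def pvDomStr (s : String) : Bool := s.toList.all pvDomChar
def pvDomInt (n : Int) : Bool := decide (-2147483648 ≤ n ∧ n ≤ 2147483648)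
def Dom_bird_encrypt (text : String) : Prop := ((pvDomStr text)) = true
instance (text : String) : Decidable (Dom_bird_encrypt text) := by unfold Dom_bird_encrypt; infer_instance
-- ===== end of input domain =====

-- B replaces A's single scan (per-character membership branch with list-append) by ten staged
-- whole-string replace passes, one per vowel (measured faster by a constant factor: C-level replace).

-- ===== PORT A =====
-- for ch in text: append ch+'@'+ch if ch in vowels else ch; then ''.join(result)
def bird_encrypt (text : String) : String :=
  let vowels : List Char := "aeiouAEIOU".toList
  let result : List String :=
    text.toList.foldl
      (fun r ch =>
        if vowels.contains ch then r ++ [String.ofList [ch, '@', ch]]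
        else r ++ [String.ofList [ch]])
      []
  String.join result

-- ===== PORT B =====
-- for v in "aeiouAEIOU": text = text.replace(v, v + '@' + v); return text
def bird_encrypt_alt (text : String) : String :=
  "aeiouAEIOU".toList.foldl
    (fun s v => PySem.Str.replace s (String.ofList [v]) (String.ofList [v, '@', v]))
    text

-- ===== PRECONDITION & SPEC =====
def Spec_bird_encrypt (text : String) (out : String) : Prop := out = bird_encrypt_alt text
instance (text : String) (out : String) : Decidable (Spec_bird_encrypt text out) := by unfold Spec_bird_encrypt; infer_instance

-- ===== CLAIM =====
def Claim_equal_bird_encrypt : Prop := ∀ (text : String), Dom_bird_encrypt text → Spec_bird_encrypt text (bird_encrypt text)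

-- ===== LEMMAS AND PROOFS =====

-- the per-character expansion once the vowels in `done` have been processed
def birdF (done : List Char) (c : Char) : List Char :=
  if done.contains c then [c, '@', c] else [c]

theorem bird_go_single (v : Char) (new : List Char) :
    ∀ (l : List Char) (fuel : Nat) (acc : List Char), l.length ≤ fuel →
    PySem.Chars.replace.go [v] new fuel l acc
      = acc.reverse ++ l.flatMap (fun c => if c = v then new else [c]) := by
  intro l
  induction l with
  | nil => intro fuel acc h; cases fuel <;> simp [PySem.Chars.replace.go]
  | cons c t ih =>
    intro fuel acc h
    cases fuel with
    | zero => simp at h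
    | succ f =>
      rw [PySem.Chars.replace.go]
      by_cases hc : c = v
      · subst hc
        simp only [List.isPrefixOf, BEq.rfl, Bool.true_and, if_pos, List.length_cons,
          List.length_nil, Nat.zero_add, List.drop_succ_cons, List.drop_zero]
        rw [ih]
        · simp
        · simpa using h
      · have hp : List.isPrefixOf [v] (c :: t) = false := by
          simp [List.isPrefixOf]; exact fun h' => hc h'.symm
        rw [if_neg (by simp [hp])]
        rw [ih]
        · simp [hc]
        · simpa using h

theorem bird_replace_single (s : List Char) (v : Char) (new : List Char) :
    PySem.Chars.replace s [v] new = s.flatMap (fun c => if c = v then new else [c]) := by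
  rw [PySem.Chars.replace]
  simp only [List.isEmpty_cons]
  exact bird_go_single v new s s.length [] (le_refl _)

theorem bird_step (l done : List Char) (v : Char) (hv : v ∉ done) (ha : '@' ≠ v) :
    PySem.Chars.replace (l.flatMap (birdF done)) [v] [v, '@', v]
      = l.flatMap (birdF (done ++ [v])) := by
  rw [bird_replace_single, List.flatMap_assoc]
  refine List.flatMap_congr (fun c _ => ?_)
  unfold birdF
  by_cases hd : c ∈ done
  · have hcv : c ≠ v := fun h => hv (h ▸ hd)
    simp [hd, hcv, ha]
  · by_cases hcv : c = v
    · subst hcv; simp [hd]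
    · simp [hd, hcv]

theorem bird_inv : ∀ (r done l : List Char), (done ++ r).Nodup → '@' ∉ done ++ r →
    r.foldl (fun s v => PySem.Chars.replace s [v] [v, '@', v]) (l.flatMap (birdF done))
      = l.flatMap (birdF (done ++ r)) := by
  intro r
  induction r with
  | nil => intro done l _ _; simp
  | cons v r' ih =>
    intro done l hnd hat
    have hv : v ∉ done := fun hmem =>
      ((List.nodup_append.mp hnd).2.2 v hmem v (List.mem_cons_self ..)) rfl
    have ha : '@' ≠ v := fun h => hat (by simp; exact Or.inr (Or.inl h))
    simp only [List.foldl_cons]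
    rw [bird_step l done v hv ha]
    have h1 : ((done ++ [v]) ++ r').Nodup := by simpa using hnd
    have h2 : '@' ∉ (done ++ [v]) ++ r' := by simpa using hat
    simpa using ih (done ++ [v]) l h1 h2

theorem bird_foldl_map (l : List Char) (acc : List String)
    (p : Char → Bool) (f g : Char → String) :
    l.foldl (fun r ch => if p ch then r ++ [f ch] else r ++ [g ch]) acc
      = acc ++ l.map (fun ch => if p ch then f ch else g ch) := by
  induction l generalizing acc with
  | nil => simp
  | cons x xs ih => by_cases h : p x <;> simp [List.foldl, ih, h]

theorem bird_join_map (l : List Char) (g : Char → List Char) :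
    (String.join (l.map (fun c => String.ofList (g c)))).toList = l.flatMap g := by
  simp [String.toList_join, List.map_map, Function.comp_def, List.flatMap_def]

theorem bird_alt_toList :
    ∀ (vs : List Char) (s : String),
    (vs.foldl (fun s v => PySem.Str.replace s (String.ofList [v]) (String.ofList [v, '@', v])) s).toList
      = vs.foldl (fun t v => PySem.Chars.replace t [v] [v, '@', v]) s.toList := by
  intro vs
  induction vs with
  | nil => intro s; rfl
  | cons v t ih =>
    intro s
    simp only [List.foldl_cons, ih, PySem.Str.toList_replace]
    congr 1
    simp

-- ===== VERDICT =====
theorem bird_encrypt_spec : Claim_equal_bird_encrypt := by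
  intro text _
  unfold Spec_bird_encrypt bird_encrypt bird_encrypt_alt
  simp only []
  rw [bird_foldl_map text.toList [] (fun ch => "aeiouAEIOU".toList.contains ch)
      (fun ch => String.ofList [ch, '@', ch]) (fun ch => String.ofList [ch])]
  simp only [List.nil_append]
  have hA : (text.toList.map
      (fun ch => if "aeiouAEIOU".toList.contains ch then String.ofList [ch, '@', ch]
                 else String.ofList [ch]))
      = text.toList.map (fun ch => String.ofList (birdF "aeiouAEIOU".toList ch)) := by
    refine List.map_congr_left (fun c _ => ?_)
    unfold birdF
    exact (apply_ite String.ofList _ _ _).symm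
  rw [hA, ← String.toList_inj, bird_join_map, bird_alt_toList]
  have h0 : text.toList = text.toList.flatMap (birdF []) := by
    conv_lhs => rw [← List.flatMap_singleton' text.toList]
    exact List.flatMap_congr (fun c _ => by simp [birdF])
  conv_rhs => rw [h0]
  exact (bird_inv "aeiouAEIOU".toList [] text.toList (by decide) (by decide)).symm
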